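-- pv_equiv track=rewrite | github.com/AmmarA06/Synthra | backend/services/notion_service.py | _generate_image_description
-- ===== SOURCE A (Python) =====
-- def _generate_image_description(img: dict) -> str:
--     """Generate a meaningful description for educational images"""
--     alt_text = img.get('alt', '')
--     title_text = img.get('title', '')
--     src_url = img.get('src', '')
--
--     # Use alt text if it's descriptive
--     if alt_text and len(alt_text) > 8 and not alt_text.lower().startswith(('image', 'img', 'picture', 'photo')):
--         return alt_text
--
--     # Use title if alt text isn't good
--     if title_text and len(title_text) > 8:
--         return title_text
--
--     # Generate description based on URL patterns and content
--     url_lower = src_url.lower()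
--
--     # Specific workflow/automation descriptions
--     if any(keyword in url_lower for keyword in ['workflow', 'trigger', 'node', 'n8n']):
--         return "Workflow automation interface showing node configuration"
--     elif any(keyword in url_lower for keyword in ['gmail', 'slack', 'integration']):
--         return "Integration setup demonstrating app connection"
--     elif 'graph' in url_lower:
--         return "Graph visualization showing data structure and relationships"
--     elif 'diagram' in url_lower:
--         return "Diagram illustrating the concept or process"
--     elif any(keyword in url_lower for keyword in ['code', 'implementation']):
--         return "Code example demonstrating the implementation"
--     elif any(keyword in url_lower for keyword in ['example', 'demo']):
--         return "Example showing practical application"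
--     elif any(keyword in url_lower for keyword in ['algorithm', 'flowchart']):
--         return "Algorithm visualization or flowchart"
--     elif any(keyword in url_lower for keyword in ['interface', 'screenshot', 'dashboard']):
--         return "Interface screenshot showing the application"
--     elif any(keyword in url_lower for keyword in ['tutorial', 'step', 'guide']):
--         return "Tutorial step demonstrating the process"
--
--     # Fallback to generic but informative description
--     return "Visual example illustrating the concept"
-- ===== SOURCE B (Python) =====
-- # B scans the whole keyword table once, collecting the minimum-priority match,
-- # instead of A's short-circuiting if/elif cascade over keyword groups.
-- _KEYWORDS = {
--     'workflow': 0, 'trigger': 0, 'node': 0, 'n8n': 0,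
--     'gmail': 1, 'slack': 1, 'integration': 1,
--     'graph': 2,
--     'diagram': 3,
--     'code': 4, 'implementation': 4,
--     'example': 5, 'demo': 5,
--     'algorithm': 6, 'flowchart': 6,
--     'interface': 7, 'screenshot': 7, 'dashboard': 7,
--     'tutorial': 8, 'step': 8, 'guide': 8,
-- }
--
-- _DESCRIPTIONS = [
--     "Workflow automation interface showing node configuration",
--     "Integration setup demonstrating app connection",
--     "Graph visualization showing data structure and relationships",
--     "Diagram illustrating the concept or process",
--     "Code example demonstrating the implementation",
--     "Example showing practical application",
--     "Algorithm visualization or flowchart",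
--     "Interface screenshot showing the application",
--     "Tutorial step demonstrating the process",
-- ]
--
--
-- def _generate_image_description(img: dict) -> str:
--     alt_text = img.get('alt', '')
--     title_text = img.get('title', '')
--
--     if alt_text and len(alt_text) > 8 and not alt_text.lower().startswith(('image', 'img', 'picture', 'photo')):
--         return alt_text
--     if title_text and len(title_text) > 8:
--         return title_text
--
--     url_lower = img.get('src', '').lower()
--     best = None
--     for kw, prio in _KEYWORDS.items():
--         if kw in url_lower and (best is None or prio < best):
--             best = prio
--     if best is None:
--         return "Visual example illustrating the concept"
--     return _DESCRIPTIONS[best]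
-- ===== Notes on version B (the rewrite author's own statement) =====
-- stated objective: alternative
-- what changed: Instead of A's short-circuiting if/elif cascade over keyword groups, B scans a flat keyword->priority table once, keeps the minimum priority among all keywords found in the URL, and indexes a description list with it (correct because priorities encode A's branch order).
import Mathlib
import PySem

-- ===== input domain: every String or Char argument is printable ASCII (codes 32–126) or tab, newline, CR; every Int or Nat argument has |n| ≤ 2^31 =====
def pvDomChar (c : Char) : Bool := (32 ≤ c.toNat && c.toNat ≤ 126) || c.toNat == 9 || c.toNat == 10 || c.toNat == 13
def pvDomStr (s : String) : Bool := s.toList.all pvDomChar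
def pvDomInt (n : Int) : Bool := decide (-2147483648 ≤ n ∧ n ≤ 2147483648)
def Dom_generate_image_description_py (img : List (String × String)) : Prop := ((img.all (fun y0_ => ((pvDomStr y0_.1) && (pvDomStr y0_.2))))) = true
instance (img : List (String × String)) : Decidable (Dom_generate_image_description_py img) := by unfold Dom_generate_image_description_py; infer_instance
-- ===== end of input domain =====

-- B replaces A's short-circuiting if/elif cascade with one full scan of a flat
-- keyword->priority table keeping the minimum priority, then indexes a description list
-- (alternative decomposition; same behaviour, same cost).

-- ===== PORT A =====
def generate_image_description_py (img : List (String × String)) : String :=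
  let alt_text := (PySem.Dict.mk img).getD "alt" ""
  let title_text := (PySem.Dict.mk img).getD "title" ""
  let src_url := (PySem.Dict.mk img).getD "src" ""
  if alt_text != "" && decide (8 < PySem.Str.len alt_text) &&
     !(PySem.Str.startswith (PySem.Str.lower alt_text) "image" ||
       PySem.Str.startswith (PySem.Str.lower alt_text) "img" ||
       PySem.Str.startswith (PySem.Str.lower alt_text) "picture" ||
       PySem.Str.startswith (PySem.Str.lower alt_text) "photo") then
    alt_text
  else if title_text != "" && decide (8 < PySem.Str.len title_text) then
    title_text
  else
    let url_lower := PySem.Str.lower src_url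
    if PySem.Str.isIn "workflow" url_lower || PySem.Str.isIn "trigger" url_lower ||
       PySem.Str.isIn "node" url_lower || PySem.Str.isIn "n8n" url_lower then
      "Workflow automation interface showing node configuration"
    else if PySem.Str.isIn "gmail" url_lower || PySem.Str.isIn "slack" url_lower ||
            PySem.Str.isIn "integration" url_lower then
      "Integration setup demonstrating app connection"
    else if PySem.Str.isIn "graph" url_lower then
      "Graph visualization showing data structure and relationships"
    else if PySem.Str.isIn "diagram" url_lower then
      "Diagram illustrating the concept or process"
    else if PySem.Str.isIn "code" url_lower || PySem.Str.isIn "implementation" url_lower then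
      "Code example demonstrating the implementation"
    else if PySem.Str.isIn "example" url_lower || PySem.Str.isIn "demo" url_lower then
      "Example showing practical application"
    else if PySem.Str.isIn "algorithm" url_lower || PySem.Str.isIn "flowchart" url_lower then
      "Algorithm visualization or flowchart"
    else if PySem.Str.isIn "interface" url_lower || PySem.Str.isIn "screenshot" url_lower ||
            PySem.Str.isIn "dashboard" url_lower then
      "Interface screenshot showing the application"
    else if PySem.Str.isIn "tutorial" url_lower || PySem.Str.isIn "step" url_lower ||
            PySem.Str.isIn "guide" url_lower then
      "Tutorial step demonstrating the process"
    else
      "Visual example illustrating the concept"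

-- ===== PORT B =====
-- Source B's _KEYWORDS dict (keyword -> priority), in insertion order
def pvKeywords : List (String × Nat) :=
  [ ("workflow", 0), ("trigger", 0), ("node", 0), ("n8n", 0),
    ("gmail", 1), ("slack", 1), ("integration", 1),
    ("graph", 2),
    ("diagram", 3),
    ("code", 4), ("implementation", 4),
    ("example", 5), ("demo", 5),
    ("algorithm", 6), ("flowchart", 6),
    ("interface", 7), ("screenshot", 7), ("dashboard", 7),
    ("tutorial", 8), ("step", 8), ("guide", 8) ]

-- Source B's _DESCRIPTIONS list
def pvDescriptions : List String :=
  [ "Workflow automation interface showing node configuration",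
    "Integration setup demonstrating app connection",
    "Graph visualization showing data structure and relationships",
    "Diagram illustrating the concept or process",
    "Code example demonstrating the implementation",
    "Example showing practical application",
    "Algorithm visualization or flowchart",
    "Interface screenshot showing the application",
    "Tutorial step demonstrating the process" ]

-- one iteration of Source B's 'for kw, prio in _KEYWORDS.items()' loop body
def pvStep (url_lower : String) (best : Option Nat) (p : String × Nat) : Option Nat :=
  if PySem.Str.isIn p.1 url_lower && (best.isNone || decide (p.2 < best.getD 0)) then
    some p.2
  else best

def generate_image_description_py_alt (img : List (String × String)) : String :=
  let alt_text := (PySem.Dict.mk img).getD "alt" ""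
  let title_text := (PySem.Dict.mk img).getD "title" ""
  if alt_text != "" && decide (8 < PySem.Str.len alt_text) &&
     !(PySem.Str.startswith (PySem.Str.lower alt_text) "image" ||
       PySem.Str.startswith (PySem.Str.lower alt_text) "img" ||
       PySem.Str.startswith (PySem.Str.lower alt_text) "picture" ||
       PySem.Str.startswith (PySem.Str.lower alt_text) "photo") then
    alt_text
  else if title_text != "" && decide (8 < PySem.Str.len title_text) then
    title_text
  else
    let url_lower := PySem.Str.lower ((PySem.Dict.mk img).getD "src" "")
    match pvKeywords.foldl (pvStep url_lower) none with
    | none => "Visual example illustrating the concept"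
    | some best => (PySem.List.pyGet? pvDescriptions (best : Int)).getD ""  -- index always in range

-- ===== PRECONDITION & SPEC =====
def Spec_generate_image_description_py (img : List (String × String)) (out : String) : Prop := out = generate_image_description_py_alt img
instance (img : List (String × String)) (out : String) : Decidable (Spec_generate_image_description_py img out) := by unfold Spec_generate_image_description_py; infer_instance

-- ===== CLAIM (what is proved, stated in full; the proofs are below) =====
def Claim_equal_generate_image_description_py : Prop := ∀ (img : List (String × String)), Dom_generate_image_description_py img → Spec_generate_image_description_py img (generate_image_description_py img)

-- ===== LEMMAS AND PROOFS =====

-- once a minimal priority is held, a suffix whose priorities are all ≥ it leaves it unchanged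
theorem pv_foldl_step_fixed (u : String) (j : Nat) :
    ∀ l : List (String × Nat), (∀ p ∈ l, j ≤ p.2) →
      l.foldl (pvStep u) (some j) = some j := by
  intro l
  induction l with
  | nil => intro _; rfl
  | cons p l ih =>
    intro h
    have hj : j ≤ p.2 := h p (by simp)
    have : pvStep u (some j) p = some j := by
      simp [pvStep, Nat.not_lt.mpr hj]
    simp only [List.foldl_cons, this]
    exact ih (fun q hq => h q (by simp [hq]))

-- on a priority-sorted table, the running minimum is the priority of the first match
theorem pv_foldl_step_sorted (u : String) :
    ∀ l : List (String × Nat), l.Pairwise (fun a b => a.2 ≤ b.2) →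
      l.foldl (pvStep u) none = (l.find? (fun p => PySem.Str.isIn p.1 u)).map Prod.snd := by
  intro l
  induction l with
  | nil => intro _; rfl
  | cons p l ih =>
    intro h
    rw [List.pairwise_cons] at h
    by_cases hp : PySem.Str.isIn p.1 u = true
    · have h1 : pvStep u none p = some p.2 := by unfold pvStep; rw [hp]; rfl
      simp only [List.foldl_cons, h1, List.find?_cons, hp, Option.map_some]
      exact pv_foldl_step_fixed u p.2 l h.1
    · have hp' : PySem.Str.isIn p.1 u = false := by rwa [Bool.not_eq_true] at hp
      have h1 : pvStep u none p = none := by unfold pvStep; rw [hp']; rfl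
      simp only [List.foldl_cons, h1, List.find?_cons, hp']
      exact ih h.2

-- the URL branch of A equals the URL branch of B, for any url_lower
theorem pv_url_eq (u : String) :
    (if PySem.Str.isIn "workflow" u || PySem.Str.isIn "trigger" u ||
        PySem.Str.isIn "node" u || PySem.Str.isIn "n8n" u then
      "Workflow automation interface showing node configuration"
    else if PySem.Str.isIn "gmail" u || PySem.Str.isIn "slack" u ||
            PySem.Str.isIn "integration" u then
      "Integration setup demonstrating app connection"
    else if PySem.Str.isIn "graph" u then
      "Graph visualization showing data structure and relationships"
    else if PySem.Str.isIn "diagram" u then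
      "Diagram illustrating the concept or process"
    else if PySem.Str.isIn "code" u || PySem.Str.isIn "implementation" u then
      "Code example demonstrating the implementation"
    else if PySem.Str.isIn "example" u || PySem.Str.isIn "demo" u then
      "Example showing practical application"
    else if PySem.Str.isIn "algorithm" u || PySem.Str.isIn "flowchart" u then
      "Algorithm visualization or flowchart"
    else if PySem.Str.isIn "interface" u || PySem.Str.isIn "screenshot" u ||
            PySem.Str.isIn "dashboard" u then
      "Interface screenshot showing the application"
    else if PySem.Str.isIn "tutorial" u || PySem.Str.isIn "step" u ||
            PySem.Str.isIn "guide" u then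
      "Tutorial step demonstrating the process"
    else
      "Visual example illustrating the concept") =
    (match pvKeywords.foldl (pvStep u) none with
     | none => "Visual example illustrating the concept"
     | some best => (PySem.List.pyGet? pvDescriptions (best : Int)).getD "") := by
  rw [pv_foldl_step_sorted u pvKeywords (by decide)]
  simp only [pvKeywords]
  cases h1 : PySem.Str.isIn "workflow" u
  case true =>
    simp only [List.find?_cons, h1, Bool.true_or, Bool.false_or, Bool.or_true, Bool.or_false, if_true, Option.map_some]
    rfl
  cases h2 : PySem.Str.isIn "trigger" u
  case true =>
    simp only [List.find?_cons, h1, h2, Bool.true_or, Bool.false_or, Bool.or_true, Bool.or_false, if_true, Option.map_some]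
    rfl
  cases h3 : PySem.Str.isIn "node" u
  case true =>
    simp only [List.find?_cons, h1, h2, h3, Bool.true_or, Bool.false_or, Bool.or_true, Bool.or_false, if_true, Option.map_some]
    rfl
  cases h4 : PySem.Str.isIn "n8n" u
  case true =>
    simp only [List.find?_cons, h1, h2, h3, h4, Bool.true_or, Bool.false_or, Bool.or_true, Bool.or_false, if_true, Option.map_some]
    rfl
  cases h5 : PySem.Str.isIn "gmail" u
  case true =>
    simp only [List.find?_cons, h1, h2, h3, h4, h5, Bool.true_or, Bool.false_or, Bool.or_true, Bool.or_false, if_true, Option.map_some]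
    rfl
  cases h6 : PySem.Str.isIn "slack" u
  case true =>
    simp only [List.find?_cons, h1, h2, h3, h4, h5, h6, Bool.true_or, Bool.false_or, Bool.or_true, Bool.or_false, if_true, Option.map_some]
    rfl
  cases h7 : PySem.Str.isIn "integration" u
  case true =>
    simp only [List.find?_cons, h1, h2, h3, h4, h5, h6, h7, Bool.true_or, Bool.false_or, Bool.or_true, Bool.or_false, if_true, Option.map_some]
    rfl
  cases h8 : PySem.Str.isIn "graph" u
  case true =>
    simp only [List.find?_cons, h1, h2, h3, h4, h5, h6, h7, h8, Bool.true_or, Bool.false_or, Bool.or_true, Bool.or_false, if_true, Option.map_some]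
    rfl
  cases h9 : PySem.Str.isIn "diagram" u
  case true =>
    simp only [List.find?_cons, h1, h2, h3, h4, h5, h6, h7, h8, h9, Bool.true_or, Bool.false_or, Bool.or_true, Bool.or_false, if_true, Option.map_some]
    rfl
  cases h10 : PySem.Str.isIn "code" u
  case true =>
    simp only [List.find?_cons, h1, h2, h3, h4, h5, h6, h7, h8, h9, h10, Bool.true_or, Bool.false_or, Bool.or_true, Bool.or_false, if_true, Option.map_some]
    rfl
  cases h11 : PySem.Str.isIn "implementation" u
  case true =>
    simp only [List.find?_cons, h1, h2, h3, h4, h5, h6, h7, h8, h9, h10, h11, Bool.true_or, Bool.false_or, Bool.or_true, Bool.or_false, if_true, Option.map_some]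
    rfl
  cases h12 : PySem.Str.isIn "example" u
  case true =>
    simp only [List.find?_cons, h1, h2, h3, h4, h5, h6, h7, h8, h9, h10, h11, h12, Bool.true_or, Bool.false_or, Bool.or_true, Bool.or_false, if_true, Option.map_some]
    rfl
  cases h13 : PySem.Str.isIn "demo" u
  case true =>
    simp only [List.find?_cons, h1, h2, h3, h4, h5, h6, h7, h8, h9, h10, h11, h12, h13, Bool.true_or, Bool.false_or, Bool.or_true, Bool.or_false, if_true, Option.map_some]
    rfl
  cases h14 : PySem.Str.isIn "algorithm" u
  case true =>
    simp only [List.find?_cons, h1, h2, h3, h4, h5, h6, h7, h8, h9, h10, h11, h12, h13, h14, Bool.true_or, Bool.false_or, Bool.or_true, Bool.or_false, if_true, Option.map_some]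
    rfl
  cases h15 : PySem.Str.isIn "flowchart" u
  case true =>
    simp only [List.find?_cons, h1, h2, h3, h4, h5, h6, h7, h8, h9, h10, h11, h12, h13, h14, h15, Bool.true_or, Bool.false_or, Bool.or_true, Bool.or_false, if_true, Option.map_some]
    rfl
  cases h16 : PySem.Str.isIn "interface" u
  case true =>
    simp only [List.find?_cons, h1, h2, h3, h4, h5, h6, h7, h8, h9, h10, h11, h12, h13, h14, h15, h16, Bool.true_or, Bool.false_or, Bool.or_true, Bool.or_false, if_true, Option.map_some]
    rfl
  cases h17 : PySem.Str.isIn "screenshot" u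
  case true =>
    simp only [List.find?_cons, h1, h2, h3, h4, h5, h6, h7, h8, h9, h10, h11, h12, h13, h14, h15, h16, h17, Bool.true_or, Bool.false_or, Bool.or_true, Bool.or_false, if_true, Option.map_some]
    rfl
  cases h18 : PySem.Str.isIn "dashboard" u
  case true =>
    simp only [List.find?_cons, h1, h2, h3, h4, h5, h6, h7, h8, h9, h10, h11, h12, h13, h14, h15, h16, h17, h18, Bool.true_or, Bool.false_or, Bool.or_true, Bool.or_false, if_true, Option.map_some]
    rfl
  cases h19 : PySem.Str.isIn "tutorial" u
  case true =>
    simp only [List.find?_cons, h1, h2, h3, h4, h5, h6, h7, h8, h9, h10, h11, h12, h13, h14, h15, h16, h17, h18, h19, Bool.true_or, Bool.false_or, Bool.or_true, Bool.or_false, if_true, Option.map_some]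
    rfl
  cases h20 : PySem.Str.isIn "step" u
  case true =>
    simp only [List.find?_cons, h1, h2, h3, h4, h5, h6, h7, h8, h9, h10, h11, h12, h13, h14, h15, h16, h17, h18, h19, h20, Bool.true_or, Bool.false_or, Bool.or_true, Bool.or_false, if_true, Option.map_some]
    rfl
  cases h21 : PySem.Str.isIn "guide" u
  case true =>
    simp only [List.find?_cons, h1, h2, h3, h4, h5, h6, h7, h8, h9, h10, h11, h12, h13, h14, h15, h16, h17, h18, h19, h20, h21, Bool.true_or, Bool.false_or, Bool.or_true, Bool.or_false, if_true, Option.map_some]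
    rfl
  simp only [List.find?_cons, h1, h2, h3, h4, h5, h6, h7, h8, h9, h10, h11, h12, h13, h14, h15, h16, h17, h18, h19, h20, h21, Bool.false_or, Bool.or_false]
  rfl

-- ===== VERDICT (by name: the statement is the Claim_ definition above) =====
theorem generate_image_description_py_spec : Claim_equal_generate_image_description_py := by
  intro img _
  unfold Spec_generate_image_description_py generate_image_description_py generate_image_description_py_alt
  simp only [pv_url_eq]
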